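-- pv_equiv track=rewrite | github.com/eduardo-aog/CalculoNumerico | Repositories/SignificantDigits.py | __utilValNegativeFormat
-- ===== SOURCE A (Python) =====
-- def __utilValNegativeFormat(num):
--     n = 0
--     for i in num:
--         if "-" in num and (n == 0 and i!= "-"):
--             return False
--         if i == "-":
--             return True
--         n += 1
--     return True
-- ===== SOURCE B (Python) =====
-- def __utilValNegativeFormat(num):
--     return "-" not in num or num[0] == "-"
-- ===== Notes on version B (the rewrite author's own statement) =====
-- stated objective: faster
-- what changed: Replaced the counting loop (which re-scans the whole string with '-' in num on every iteration) with the single-pass closed-form predicate it computes: no dash present, or the first character is a dash.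
import Mathlib
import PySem

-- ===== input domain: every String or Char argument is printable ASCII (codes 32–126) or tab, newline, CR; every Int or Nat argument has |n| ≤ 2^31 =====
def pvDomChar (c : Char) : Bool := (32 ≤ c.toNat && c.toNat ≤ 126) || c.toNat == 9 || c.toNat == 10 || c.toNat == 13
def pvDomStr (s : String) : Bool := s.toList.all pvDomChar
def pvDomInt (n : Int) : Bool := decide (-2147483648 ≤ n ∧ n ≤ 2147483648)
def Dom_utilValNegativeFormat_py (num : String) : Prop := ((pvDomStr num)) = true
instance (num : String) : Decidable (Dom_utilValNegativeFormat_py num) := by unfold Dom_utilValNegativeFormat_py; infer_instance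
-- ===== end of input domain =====

-- ===== PORT A =====
-- B changes: one-line closed-form predicate instead of A's counting loop (objective: faster — A redoes '"-" in num' each iteration).
-- loop of A: n is the counter, full stays the whole string (for the "-" in num test)
def pvLoopA : List Char → Int → List Char → Bool
  | [], _, _ => true
  | i :: rest, n, full =>
    if full.contains '-' && (n == 0 && i != '-') then false
    else if i == '-' then true
    else pvLoopA rest (n + 1) full

def utilValNegativeFormat_py (num : String) : Bool :=
  pvLoopA num.toList 0 num.toList

-- ===== PORT B =====
def utilValNegativeFormat_py_alt (num : String) : Bool :=
  !(num.toList.contains '-') || (num.toList[0]? == some '-')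

-- ===== PRECONDITION & SPEC =====
def Spec_utilValNegativeFormat_py (num : String) (out : Bool) : Prop := out = utilValNegativeFormat_py_alt num
instance (num : String) (out : Bool) : Decidable (Spec_utilValNegativeFormat_py num out) := by unfold Spec_utilValNegativeFormat_py; infer_instance

-- ===== CLAIM =====
def Claim_equal_utilValNegativeFormat_py : Prop := ∀ (num : String), Dom_utilValNegativeFormat_py num → Spec_utilValNegativeFormat_py num (utilValNegativeFormat_py num)

-- ===== LEMMAS AND PROOFS =====
theorem pvLoopA_no_dash (l : List Char) (n : Int) (full : List Char)
    (hf : full.contains '-' = false) (hl : ∀ c ∈ l, c ≠ '-') :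
    pvLoopA l n full = true := by
  induction l generalizing n with
  | nil => rfl
  | cons i rest ih =>
    have hi : i ≠ '-' := hl i (by simp)
    simp only [pvLoopA, hf]
    simp [hi, ih (n + 1) (fun c hc => hl c (by simp [hc]))]

-- ===== VERDICT =====
theorem utilValNegativeFormat_py_spec : Claim_equal_utilValNegativeFormat_py := by
  intro num _
  unfold Spec_utilValNegativeFormat_py utilValNegativeFormat_py utilValNegativeFormat_py_alt
  cases h : num.toList with
  | nil => simp [pvLoopA]
  | cons i rest =>
    by_cases hc : (i :: rest).contains '-'
    · by_cases hi : i = '-'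
      · subst hi; simp [pvLoopA]
      · have hmem : '-' ∈ rest := by
          simp [List.contains_eq_mem] at hc
          tauto
        simp [pvLoopA, hi, hmem]
    · have hc' : (i :: rest).contains '-' = false := by simpa using hc
      have hnd : ∀ c ∈ (i :: rest), c ≠ '-' := by
        intro c hm he; subst he
        simp [List.contains_eq_mem] at hc'
        exact absurd hm (by simpa using hc')
      rw [pvLoopA_no_dash _ 0 _ hc' hnd]
      simp [List.contains_eq_mem] at hc'
      simp
      tauto
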